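-- pv_equiv track=rewrite | github.com/kevin-toles/tpm-job-finder-poc | tpm_job_finder_poc/enrichment/immigration_support_service.py | _same_continent
-- ===== SOURCE A (Python) =====
-- def _same_continent(country1: str, country2: str) -> bool:
--     """Check if two countries are on the same continent."""
--     continents = {
--         'north_america': ['US', 'CA', 'MX'],
--         'europe': ['GB', 'DE', 'FR', 'NL', 'CH', 'SE', 'NO', 'DK', 'ES', 'IT'],
--         'asia_pacific': ['SG', 'AU', 'NZ', 'JP', 'KR', 'HK', 'MY', 'TH'],
--         'middle_east': ['AE', 'SA', 'QA', 'KW']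
--     }
--
--     for continent, countries in continents.items():
--         if country1.upper() in countries and country2.upper() in countries:
--             return True
--
--     return False
-- ===== SOURCE B (Python) =====
-- def _same_continent(country1: str, country2: str) -> bool:
--     """Check if two countries are on the same continent."""
--     continents = {
--         'north_america': ['US', 'CA', 'MX'],
--         'europe': ['GB', 'DE', 'FR', 'NL', 'CH', 'SE', 'NO', 'DK', 'ES', 'IT'],
--         'asia_pacific': ['SG', 'AU', 'NZ', 'JP', 'KR', 'HK', 'MY', 'TH'],
--         'middle_east': ['AE', 'SA', 'QA', 'KW']
--     }
--     country_to_continent = {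
--         code: continent
--         for continent, codes in continents.items()
--         for code in codes
--     }
--     a = country_to_continent.get(country1.upper())
--     b = country_to_continent.get(country2.upper())
--     return a is not None and a == b
-- ===== Notes on version B (the rewrite author's own statement) =====
-- stated objective: idiomatic
-- what changed: Replaces the loop that scans each continent's member list for both codes with an inverted code->continent dict built once, so the answer is two direct lookups plus one guarded comparison.
import Mathlib
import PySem

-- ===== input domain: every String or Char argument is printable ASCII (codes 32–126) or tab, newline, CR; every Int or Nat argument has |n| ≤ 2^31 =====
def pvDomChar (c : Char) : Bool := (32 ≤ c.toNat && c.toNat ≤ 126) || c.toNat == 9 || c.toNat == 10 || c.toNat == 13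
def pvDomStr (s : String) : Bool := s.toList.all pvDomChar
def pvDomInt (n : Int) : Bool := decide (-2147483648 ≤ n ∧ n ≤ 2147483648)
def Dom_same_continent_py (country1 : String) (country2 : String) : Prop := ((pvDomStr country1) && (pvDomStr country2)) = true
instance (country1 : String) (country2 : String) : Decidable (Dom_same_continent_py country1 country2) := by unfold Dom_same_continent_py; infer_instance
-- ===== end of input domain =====

-- B replaces A's scan over each continent's member list by an inverted code→continent
-- map built once from the same data, then two direct lookups and one comparison (idiomatic).

-- ===== PORT A =====
-- the 'continents' dict, in insertion order, as its items list
def pvContinents : List (String × List String) :=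
  [("north_america", ["US", "CA", "MX"]),
   ("europe", ["GB", "DE", "FR", "NL", "CH", "SE", "NO", "DK", "ES", "IT"]),
   ("asia_pacific", ["SG", "AU", "NZ", "JP", "KR", "HK", "MY", "TH"]),
   ("middle_east", ["AE", "SA", "QA", "KW"])]

-- the 'for continent, countries in continents.items()' loop with its early 'return True'
def pvLoopA (country1 country2 : String) : List (String × List String) → Bool
  | [] => false
  | (_, countries) :: rest =>
    if countries.contains (PySem.Str.upper country1) && countries.contains (PySem.Str.upper country2) then
      true
    else
      pvLoopA country1 country2 rest

def same_continent_py (country1 : String) (country2 : String) : Bool :=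
  pvLoopA country1 country2 pvContinents

-- ===== PORT B =====
-- the dict comprehension {code: continent for continent, codes in continents.items() for code in codes}
def pvCountryToContinent : PySem.Dict String String :=
  pvContinents.foldl
    (fun d cc => cc.2.foldl (fun d code => d.insert code cc.1) d)
    PySem.Dict.empty

def same_continent_py_alt (country1 : String) (country2 : String) : Bool :=
  let a := pvCountryToContinent.get? (PySem.Str.upper country1)
  let b := pvCountryToContinent.get? (PySem.Str.upper country2)
  a.isSome && a == b

-- ===== PRECONDITION & SPEC =====
def Spec_same_continent_py (country1 : String) (country2 : String) (out : Bool) : Prop := out = same_continent_py_alt country1 country2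
instance (country1 : String) (country2 : String) (out : Bool) : Decidable (Spec_same_continent_py country1 country2 out) := by unfold Spec_same_continent_py; infer_instance

-- ===== CLAIM (what is proved, stated in full; the proofs are below) =====
def Claim_equal_same_continent_py : Prop := ∀ (country1 : String) (country2 : String), Dom_same_continent_py country1 country2 → Spec_same_continent_py country1 country2 (same_continent_py country1 country2)

-- ===== LEMMAS AND PROOFS =====

-- all 25 country codes appearing in the data
def pvAllCodes : List String :=
  ["US", "CA", "MX", "GB", "DE", "FR", "NL", "CH", "SE", "NO", "DK", "ES", "IT",
   "SG", "AU", "NZ", "JP", "KR", "HK", "MY", "TH", "AE", "SA", "QA", "KW"]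

-- every string is either one of the 25 known codes or belongs to no continent list
lemma pv_classify (u : String) :
    u ∈ pvAllCodes ∨
    ((["US", "CA", "MX"] : List String).contains u = false ∧
     (["GB", "DE", "FR", "NL", "CH", "SE", "NO", "DK", "ES", "IT"] : List String).contains u = false ∧
     (["SG", "AU", "NZ", "JP", "KR", "HK", "MY", "TH"] : List String).contains u = false ∧
     (["AE", "SA", "QA", "KW"] : List String).contains u = false) := by
  by_cases h : u ∈ pvAllCodes
  · exact Or.inl h
  · right
    simp [pvAllCodes] at h
    simp [List.contains_eq_mem]
    refine ⟨?_, ?_, ?_, ?_⟩ <;> tauto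

-- a lookup in the inverted map misses exactly when the code is in no continent list
lemma pv_get_none (u : String)
    (h : (["US", "CA", "MX"] : List String).contains u = false ∧
         (["GB", "DE", "FR", "NL", "CH", "SE", "NO", "DK", "ES", "IT"] : List String).contains u = false ∧
         (["SG", "AU", "NZ", "JP", "KR", "HK", "MY", "TH"] : List String).contains u = false ∧
         (["AE", "SA", "QA", "KW"] : List String).contains u = false) :
    pvCountryToContinent.get? u = none := by
  obtain ⟨h1, h2, h3, h4⟩ := h
  simp [List.contains_eq_mem] at h1 h2 h3 h4
  simp [pvCountryToContinent, pvContinents, List.foldl, PySem.Dict.get?_insert]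
  simp_all

set_option maxHeartbeats 1000000 in
-- the inverted map's lookup, characterised by the four membership tests
lemma pv_get (u : String) :
    pvCountryToContinent.get? u =
      (if (["US", "CA", "MX"] : List String).contains u then some "north_america"
       else if (["GB", "DE", "FR", "NL", "CH", "SE", "NO", "DK", "ES", "IT"] : List String).contains u then some "europe"
       else if (["SG", "AU", "NZ", "JP", "KR", "HK", "MY", "TH"] : List String).contains u then some "asia_pacific"
       else if (["AE", "SA", "QA", "KW"] : List String).contains u then some "middle_east"
       else none) := by
  rcases pv_classify u with h | h
  · fin_cases h <;> decide
  · obtain ⟨a1, a2, a3, a4⟩ := h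
    rw [pv_get_none u ⟨a1, a2, a3, a4⟩, a1, a2, a3, a4]
    simp

set_option maxHeartbeats 1000000 in
-- the four continent lists are pairwise disjoint
lemma pv_disj (u : String) :
    ((["US", "CA", "MX"] : List String).contains u = true →
       (["GB", "DE", "FR", "NL", "CH", "SE", "NO", "DK", "ES", "IT"] : List String).contains u = false ∧
       (["SG", "AU", "NZ", "JP", "KR", "HK", "MY", "TH"] : List String).contains u = false ∧
       (["AE", "SA", "QA", "KW"] : List String).contains u = false) ∧
    ((["GB", "DE", "FR", "NL", "CH", "SE", "NO", "DK", "ES", "IT"] : List String).contains u = true →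
       (["SG", "AU", "NZ", "JP", "KR", "HK", "MY", "TH"] : List String).contains u = false ∧
       (["AE", "SA", "QA", "KW"] : List String).contains u = false) ∧
    ((["SG", "AU", "NZ", "JP", "KR", "HK", "MY", "TH"] : List String).contains u = true →
       (["AE", "SA", "QA", "KW"] : List String).contains u = false) := by
  rcases pv_classify u with h | h
  · fin_cases h <;> decide
  · obtain ⟨a1, a2, a3, a4⟩ := h
    rw [a1, a2, a3, a4]
    simp

set_option maxHeartbeats 2000000 in
-- purely boolean core: both sides as functions of the eight membership bits
lemma pv_bool_key (a1 a2 a3 a4 b1 b2 b3 b4 : Bool)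
    (ha1 : a1 = true → a2 = false ∧ a3 = false ∧ a4 = false)
    (ha2 : a2 = true → a3 = false ∧ a4 = false)
    (ha3 : a3 = true → a4 = false)
    (hb1 : b1 = true → b2 = false ∧ b3 = false ∧ b4 = false)
    (hb2 : b2 = true → b3 = false ∧ b4 = false)
    (hb3 : b3 = true → b4 = false) :
    (if a1 && b1 then true
     else if a2 && b2 then true
     else if a3 && b3 then true
     else if a4 && b4 then true
     else false) =
      ((if a1 then some "north_america" else if a2 then some "europe" else if a3 then some "asia_pacific" else if a4 then some "middle_east" else (none : Option String)).isSome &&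
       ((if a1 then some "north_america" else if a2 then some "europe" else if a3 then some "asia_pacific" else if a4 then some "middle_east" else (none : Option String)) ==
        (if b1 then some "north_america" else if b2 then some "europe" else if b3 then some "asia_pacific" else if b4 then some "middle_east" else (none : Option String)))) := by
  cases a1 <;> cases a2 <;> cases a3 <;> cases a4 <;> cases b1 <;> cases b2 <;> cases b3 <;> cases b4 <;>
    first
      | rfl
      | decide
      | simp_all

-- with both lookups rewritten by pv_get, the two ports agree
lemma pv_key (u1 u2 : String) :
    (if (["US", "CA", "MX"] : List String).contains u1 && (["US", "CA", "MX"] : List String).contains u2 then true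
     else if (["GB", "DE", "FR", "NL", "CH", "SE", "NO", "DK", "ES", "IT"] : List String).contains u1 && (["GB", "DE", "FR", "NL", "CH", "SE", "NO", "DK", "ES", "IT"] : List String).contains u2 then true
     else if (["SG", "AU", "NZ", "JP", "KR", "HK", "MY", "TH"] : List String).contains u1 && (["SG", "AU", "NZ", "JP", "KR", "HK", "MY", "TH"] : List String).contains u2 then true
     else if (["AE", "SA", "QA", "KW"] : List String).contains u1 && (["AE", "SA", "QA", "KW"] : List String).contains u2 then true
     else false) =
      ((pvCountryToContinent.get? u1).isSome &&
        (pvCountryToContinent.get? u1 == pvCountryToContinent.get? u2)) := by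
  obtain ⟨d11, d12, d13⟩ := pv_disj u1
  obtain ⟨d21, d22, d23⟩ := pv_disj u2
  rw [pv_get u1, pv_get u2]
  exact pv_bool_key _ _ _ _ _ _ _ _ d11 d12 d13 d21 d22 d23

-- ===== VERDICT (by name: the statement is the Claim_ definition above) =====
theorem same_continent_py_spec : Claim_equal_same_continent_py := by
  intro c1 c2 _
  unfold Spec_same_continent_py same_continent_py same_continent_py_alt
  simp only [pvContinents, pvLoopA]
  exact pv_key (PySem.Str.upper c1) (PySem.Str.upper c2)
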